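-- pv_equiv track=rewrite | github.com/kartikcseai/Python-Programming | AlternatingEvenOdd.py | alternating
-- ===== SOURCE A (Python) =====
-- def alternating(lst):
--     if not lst:  # Empty list case
--         return True
--     if lst[0] % 2 != 0:  # First element must be even
--         return False
--     for i in range(1, len(lst)):  # Check alternating pattern
--         if lst[i] % 2 == lst[i - 1] % 2:
--             return False
--     return True
-- ===== SOURCE B (Python) =====
-- def alternating(lst):
--     return all(x % 2 == i % 2 for i, x in enumerate(lst))
-- ===== Notes on version B (the rewrite author's own statement) =====
-- stated objective: idiomatic
-- what changed: Replaced the empty/first-element guards and the previous-element comparison loop by a single positional test: every element's parity must equal its index's parity (all over enumerate).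
import Mathlib
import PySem

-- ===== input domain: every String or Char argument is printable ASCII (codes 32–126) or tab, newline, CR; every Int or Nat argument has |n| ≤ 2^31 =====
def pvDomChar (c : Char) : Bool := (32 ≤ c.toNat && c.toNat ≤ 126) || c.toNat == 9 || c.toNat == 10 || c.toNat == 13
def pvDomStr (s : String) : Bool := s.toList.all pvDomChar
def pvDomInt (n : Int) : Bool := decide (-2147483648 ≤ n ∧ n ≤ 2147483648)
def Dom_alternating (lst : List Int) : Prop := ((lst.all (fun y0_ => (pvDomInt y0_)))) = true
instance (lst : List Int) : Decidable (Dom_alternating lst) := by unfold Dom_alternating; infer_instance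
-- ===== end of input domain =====

-- B replaces the guards and previous-element loop by one positional parity test (idiomatic; same cost).

-- ===== PORT A =====
def alternating (lst : List Int) : Bool :=
  if lst = [] then true
  else if PySem.Int.mod (PySem.List.pyGetD lst 0 0) 2 ≠ 0 then false
  else (PySem.List.pyRange 1 lst.length 1).all (fun i =>
    !(PySem.Int.mod (PySem.List.pyGetD lst i 0) 2 == PySem.Int.mod (PySem.List.pyGetD lst (i - 1) 0) 2))

-- ===== PORT B =====
def alternating_alt (lst : List Int) : Bool :=
  (PySem.List.enumerate lst 0).all (fun p => PySem.Int.mod p.2 2 == PySem.Int.mod p.1 2)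

-- ===== PRECONDITION & SPEC =====
def Spec_alternating (lst : List Int) (out : Bool) : Prop := out = alternating_alt lst
instance (lst : List Int) (out : Bool) : Decidable (Spec_alternating lst out) := by unfold Spec_alternating; infer_instance

-- ===== CLAIM (what is proved, stated in full; the proofs are below) =====
def Claim_equal_alternating : Prop := ∀ (lst : List Int), Dom_alternating lst → Spec_alternating lst (alternating lst)

-- ===== LEMMAS AND PROOFS =====

-- A's value, as a Prop: head even and adjacent parities differ
theorem alternating_eq_true_iff (lst : List Int) (h : lst ≠ []) :
    alternating lst = true ↔
      (PySem.List.pyGetD lst 0 0) % 2 = 0 ∧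
      ∀ i : Int, 1 ≤ i → i < lst.length →
        (PySem.List.pyGetD lst i 0) % 2 ≠ (PySem.List.pyGetD lst (i - 1) 0) % 2 := by
  simp only [alternating, if_neg h, PySem.Int.mod_eq_emod_of_pos (a := _) (by omega : (0:Int) < 2)]
  by_cases h0 : (PySem.List.pyGetD lst 0 0) % 2 = 0
  · rw [if_neg (by simpa using h0)]
    simp only [List.all_eq_true, PySem.List.mem_pyRange_one]
    constructor
    · intro hall
      exact ⟨h0, fun i h1 h2 => by simpa using hall i ⟨h1, h2⟩⟩
    · rintro ⟨-, hall⟩ i ⟨h1, h2⟩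
      simpa using hall i h1 h2
  · rw [if_pos (by simpa using h0)]
    simp [h0]

-- B's value, as a Prop: element parity equals index parity
theorem alternating_alt_eq_true_iff (lst : List Int) :
    alternating_alt lst = true ↔
      ∀ k : Nat, (hk : k < lst.length) → lst[k] % 2 = (k : Int) % 2 := by
  simp only [alternating_alt, List.all_eq_true,
    PySem.Int.mod_eq_emod_of_pos (a := _) (by omega : (0:Int) < 2)]
  constructor
  · intro hall k hk
    have := hall (((k : Int), lst[k])) (by
      rw [PySem.List.mem_enumerate_iff]; exact ⟨k, hk, by simp⟩)
    simpa using this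
  · intro hpos p hp
    rw [PySem.List.mem_enumerate_iff] at hp
    obtain ⟨k, hk, rfl⟩ := hp
    simpa using hpos k hk

theorem pyGetD_nat (lst : List Int) (k : Nat) (hk : k < lst.length) :
    PySem.List.pyGetD lst (k : Int) 0 = lst[k] := by
  rw [PySem.List.pyGetD_natCast]
  exact List.getD_eq_getElem _ _ hk

theorem alternating_eq_alt (lst : List Int) : alternating lst = alternating_alt lst := by
  rcases eq_or_ne lst [] with rfl | h
  · decide
  · rw [Bool.eq_iff_iff, alternating_eq_true_iff lst h, alternating_alt_eq_true_iff lst]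
    have hlen : 0 < lst.length := List.length_pos_iff.mpr h
    have h0 : PySem.List.pyGetD lst 0 0 = lst[0] := by
      have := pyGetD_nat lst 0 hlen; simpa using this
    constructor
    · rintro ⟨heven, hdiff⟩ k
      induction k with
      | zero => intro _; rw [h0] at heven; simpa using heven
      | succ n ih =>
        intro hk
        have hn : n < lst.length := by omega
        have ihn := ih hn
        have hd := hdiff ((n : Int) + 1) (by omega) (by omega)
        rw [show ((n : Int) + 1 - 1) = (n : Int) by ring] at hd
        rw [show ((n : Int) + 1) = ((n + 1 : Nat) : Int) by push_cast; ring] at hd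
        rw [pyGetD_nat lst (n + 1) hk, pyGetD_nat lst n hn] at hd
        have h1 : lst[n + 1] % 2 = 0 ∨ lst[n + 1] % 2 = 1 := by omega
        push_cast
        omega
    · intro hpos
      refine ⟨by rw [h0]; simpa using hpos 0 hlen, ?_⟩
      intro i h1 h2
      obtain ⟨n, rfl⟩ : ∃ n : Nat, i = (n : Int) := ⟨i.toNat, by omega⟩
      have hi : n < lst.length := by omega
      have hi1 : n - 1 < lst.length := by omega
      rw [show (n : Int) - 1 = ((n - 1 : Nat) : Int) by omega,
        pyGetD_nat lst n hi, pyGetD_nat lst (n - 1) hi1]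
      have p1 := hpos n hi
      have p2 := hpos (n - 1) hi1
      rw [p1, p2]
      omega

-- ===== VERDICT (by name: the statement is the Claim_ definition above) =====
theorem alternating_spec : Claim_equal_alternating := by
  intro lst _
  unfold Spec_alternating
  exact alternating_eq_alt lst
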